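-- pv_equiv track=rewrite | github.com/itsmexp/UNICAL-FondamentiDiProgrammazione-1 | Programmi/R6.py | lControllo
-- ===== SOURCE A (Python) =====
-- def lControllo(mat, x):
--     if x < 2:
--         return True
--     somma = 0
--     for i in range(x):
--         somma += mat[i][len(mat[0]) - x]
--     somma += sum(mat[i][len(mat[0]) - x:])
--     somma -= mat[x-1][len(mat[0]) - x]
--     if somma % mat[x-1][len(mat[0]) - x] == 0:
--         return lControllo(mat, x-1)
--     else:
--         return False
-- ===== SOURCE B (Python) =====
-- def lControllo(mat, x):
--     for x2 in range(x, 1, -1):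
--         c = len(mat[0]) - x2
--         row = mat[x2 - 1]
--         somma = sum(mat[i][c] for i in range(x2 - 1)) + sum(row[c:])
--         if somma % row[c] != 0:
--             return False
--     return True
-- ===== Notes on version B (the rewrite author's own statement) =====
-- stated objective: simpler
-- what changed: Replaced A's tail recursion on x by an explicit countdown loop over range(x,1,-1) with early return, and replaced A's add-then-subtract column sum (sum over range(x) plus row tail minus the corner) by a direct sum over range(x2-1) plus the row tail.
import Mathlib
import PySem

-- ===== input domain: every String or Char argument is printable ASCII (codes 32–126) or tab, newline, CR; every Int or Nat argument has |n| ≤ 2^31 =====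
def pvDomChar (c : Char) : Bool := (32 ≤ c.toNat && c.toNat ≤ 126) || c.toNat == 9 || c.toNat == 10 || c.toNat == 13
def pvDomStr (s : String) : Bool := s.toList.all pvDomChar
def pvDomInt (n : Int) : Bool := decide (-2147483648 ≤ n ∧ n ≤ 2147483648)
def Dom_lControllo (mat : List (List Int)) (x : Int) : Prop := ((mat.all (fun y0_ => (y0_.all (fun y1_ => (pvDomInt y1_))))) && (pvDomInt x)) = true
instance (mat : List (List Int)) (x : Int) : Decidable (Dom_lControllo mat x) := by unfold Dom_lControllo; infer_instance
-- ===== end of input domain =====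

-- B replaces A's tail recursion by an explicit countdown loop with early return and
-- computes each level's sum directly (no add-then-subtract of the corner): simpler.

-- ===== PORT A =====
-- A's recursion lControllo(mat, x-1), made structural with fuel = x.toNat (fuel only guards
-- termination: it is always sufficient, the 0-case is reached only when x ≤ 0 < 2)
def lControlloFuel (mat : List (List Int)) : Nat → Int → Bool
  | 0, _ => true
  | fuel + 1, x =>
    if x < 2 then true
    else
      let len0 : Int := ((PySem.List.pyGetD mat 0 []).length : Int)
      let somma0 : Int := (PySem.List.pyRange 0 x 1).foldl
        (fun s i => s + PySem.List.pyGetD (PySem.List.pyGetD mat i []) (len0 - x) 0) 0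
      -- Python's leftover loop variable i equals x-1 here (range(x) is nonempty since 2 ≤ x)
      let somma1 : Int := somma0 + (PySem.List.slice (PySem.List.pyGetD mat (x - 1) []) (some (len0 - x)) none).sum
      let somma2 : Int := somma1 - PySem.List.pyGetD (PySem.List.pyGetD mat (x - 1) []) (len0 - x) 0
      if PySem.Int.mod somma2 (PySem.List.pyGetD (PySem.List.pyGetD mat (x - 1) []) (len0 - x) 0) == 0 then
        lControlloFuel mat fuel (x - 1)
      else false

def lControllo (mat : List (List Int)) (x : Int) : Bool :=
  lControlloFuel mat x.toNat x

-- ===== PORT B =====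
-- the body of B's for-loop, one recursive step per remaining value of x2
def lcCheck (mat : List (List Int)) : List Int → Bool
  | [] => true
  | x2 :: rest =>
    let c : Int := ((PySem.List.pyGetD mat 0 []).length : Int) - x2
    let row : List Int := PySem.List.pyGetD mat (x2 - 1) []
    let somma : Int := (PySem.List.pyRange 0 (x2 - 1) 1).foldl
      (fun s i => s + PySem.List.pyGetD (PySem.List.pyGetD mat i []) c 0) 0
      + (PySem.List.slice row (some c) none).sum
    if PySem.Int.mod somma (PySem.List.pyGetD row c 0) != 0 then false
    else lcCheck mat rest

def lControllo_alt (mat : List (List Int)) (x : Int) : Bool :=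
  lcCheck mat (PySem.List.pyRange x 1 (-1))

-- ===== PRECONDITION & SPEC =====
-- Helpers describing ONE level x2 of the check, written directly on the input
-- (they are not the ports): the divisor, whether executing level x2 would raise
-- (IndexError: mat empty, fewer than x2 rows, or a column index out of range
-- even after Python's negative wraparound; ZeroDivisionError: divisor 0), and
-- whether level x2 executes fine and returns False (sum not divisible).
def lcDiv (mat : List (List Int)) (x2 : Int) : Int :=
  PySem.List.pyGetD (PySem.List.pyGetD mat (x2 - 1) [])
    (((PySem.List.pyGetD mat 0 []).length : Int) - x2) 0

def lcBad (mat : List (List Int)) (x2 : Int) : Bool :=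
  decide (mat = []) || decide ((mat.length : Int) < x2) ||
  (PySem.List.pyRange 0 x2 1).any (fun i =>
    (PySem.List.pyGet? (PySem.List.pyGetD mat i [])
      (((PySem.List.pyGetD mat 0 []).length : Int) - x2)).isNone) ||
  (lcDiv mat x2 == 0)

def lcGoodFail (mat : List (List Int)) (x2 : Int) : Bool :=
  !lcBad mat x2 &&
  (PySem.Int.mod
    ((PySem.List.pyRange 0 (x2 - 1) 1).foldl
      (fun s i => s + PySem.List.pyGetD (PySem.List.pyGetD mat i [])
        (((PySem.List.pyGetD mat 0 []).length : Int) - x2) 0) 0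
      + (PySem.List.slice (PySem.List.pyGetD mat (x2 - 1) [])
          (some (((PySem.List.pyGetD mat 0 []).length : Int) - x2)) none).sum)
    (lcDiv mat x2) != 0)

-- Pre_ excludes exactly the inputs on which A raises (IndexError or ZeroDivisionError):
-- A raises iff some level K ∈ [2,x] would raise and no level above K returns False first;
-- on every input where A returns, Pre_ holds.  (B raises on exactly the same inputs.)
def Pre_lControllo (mat : List (List Int)) (x : Int) : Prop :=
  x < 2 ∨
  (x ≤ (mat.length : Int) ∧   -- if x > len(mat) the top level K = x itself raises, so Pre_ is false anyway
   ∀ K ∈ PySem.List.pyRange 2 (x + 1) 1, lcBad mat K = true →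
     ∃ j ∈ PySem.List.pyRange (K + 1) (x + 1) 1, lcGoodFail mat j = true)
instance (mat : List (List Int)) (x : Int) : Decidable (Pre_lControllo mat x) := by
  unfold Pre_lControllo; infer_instance

def pvWitness_lControllo : List (List Int) × Int := ([[2, 4], [4, 2]], 2)

def Spec_lControllo (mat : List (List Int)) (x : Int) (out : Bool) : Prop := out = lControllo_alt mat x
instance (mat : List (List Int)) (x : Int) (out : Bool) : Decidable (Spec_lControllo mat x out) := by
  unfold Spec_lControllo; infer_instance

-- ===== CLAIM (what is proved, stated in full; the proofs are below) =====
def Claim_equal_lControllo : Prop := ∀ (mat : List (List Int)) (x : Int), Dom_lControllo mat x → Pre_lControllo mat x → Spec_lControllo mat x (lControllo mat x)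

-- ===== LEMMAS AND PROOFS =====

-- The equality of the two ports is in fact unconditional: A's level sum
-- (Σ_{i<x} mat[i][c] + tail − corner) equals B's (Σ_{i<x-1} mat[i][c] + tail),
-- and the recursion/loop step align level by level.
theorem lControlloFuel_eq_lcCheck (mat : List (List Int)) :
    ∀ (fuel : Nat) (x : Int), fuel = x.toNat →
      lControlloFuel mat fuel x = lcCheck mat (PySem.List.pyRange x 1 (-1)) := by
  intro fuel
  induction fuel with
  | zero =>
    intro x hx
    rw [lControlloFuel, PySem.List.pyRange_neg_one_eq_nil (by omega : x ≤ 1), lcCheck]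
  | succ fuel ih =>
    intro x hx
    by_cases h : x < 2
    · rw [lControlloFuel, PySem.List.pyRange_neg_one_eq_nil (by omega : x ≤ 1)]
      simp [h, lcCheck]
    · rw [lControlloFuel, PySem.List.pyRange_neg_one_cons (by omega : (1:Int) < x), lcCheck]
      simp only [h, if_false]
      have hsplit : PySem.List.pyRange 0 x 1
          = PySem.List.pyRange 0 (x - 1) 1 ++ [x - 1] := by
        have := PySem.List.pyRange_one_succ_right (a := 0) (b := x - 1) (by omega)
        simpa using this
      rw [hsplit, List.foldl_append]
      simp only [List.foldl_cons, List.foldl_nil]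
      have hsum :
          ((PySem.List.pyRange 0 (x - 1) 1).foldl
            (fun s i => s + PySem.List.pyGetD (PySem.List.pyGetD mat i []) (((PySem.List.pyGetD mat 0 []).length : Int) - x) 0) 0
            + PySem.List.pyGetD (PySem.List.pyGetD mat (x - 1) []) (((PySem.List.pyGetD mat 0 []).length : Int) - x) 0)
            + (PySem.List.slice (PySem.List.pyGetD mat (x - 1) []) (some (((PySem.List.pyGetD mat 0 []).length : Int) - x)) none).sum
            - PySem.List.pyGetD (PySem.List.pyGetD mat (x - 1) []) (((PySem.List.pyGetD mat 0 []).length : Int) - x) 0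
          = (PySem.List.pyRange 0 (x - 1) 1).foldl
            (fun s i => s + PySem.List.pyGetD (PySem.List.pyGetD mat i []) (((PySem.List.pyGetD mat 0 []).length : Int) - x) 0) 0
            + (PySem.List.slice (PySem.List.pyGetD mat (x - 1) []) (some (((PySem.List.pyGetD mat 0 []).length : Int) - x)) none).sum := by
        ring
      simp only [hsum]
      by_cases hmod : PySem.Int.mod
          ((PySem.List.pyRange 0 (x - 1) 1).foldl
            (fun s i => s + PySem.List.pyGetD (PySem.List.pyGetD mat i []) (((PySem.List.pyGetD mat 0 []).length : Int) - x) 0) 0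
            + (PySem.List.slice (PySem.List.pyGetD mat (x - 1) []) (some (((PySem.List.pyGetD mat 0 []).length : Int) - x)) none).sum)
          (PySem.List.pyGetD (PySem.List.pyGetD mat (x - 1) []) (((PySem.List.pyGetD mat 0 []).length : Int) - x) 0) = 0
      · simp only [hmod, beq_self_eq_true, if_true, bne_self_eq_false, Bool.false_eq_true, if_false]
        exact ih (x - 1) (by omega)
      · simp [hmod]

-- ===== VERDICT (by name: the statement is the Claim_ definition above) =====
theorem lControllo_spec : Claim_equal_lControllo := by
  intro mat x _ _
  unfold Spec_lControllo lControllo_alt lControllo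
  exact lControlloFuel_eq_lcCheck mat x.toNat x rfl
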